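-- pv_equiv track=rewrite | github.com/antono91/Advent-of-Code-2022 | day24/main.py | create_blizzard_dict
-- ===== SOURCE A (Python) =====
-- def create_blizzard_dict(blizzards, width, height):
--     blizzards_by_t = {0: set((x, y) for x, y, _, _ in blizzards)}
--     for t in range(1, (width - 1) * (height - 1) - 1):
--         for _ in range(len(blizzards)):
--             x, y, dx, dy = blizzards.pop(0)
--             nx, ny = x + dx, y + dy
--             ny = 1 if ny >= height else height - 1 if ny < 1 else ny
--             nx = 1 if nx >= width else width - 1 if nx < 1 else nx
--             blizzards.append((nx, ny, dx, dy))
--         blizzards_by_t[t] = set((x, y) for x, y, _, _ in blizzards)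
--     return blizzards_by_t
-- ===== SOURCE B (Python) =====
-- def create_blizzard_dict(blizzards, width, height):
--     T = (width - 1) * (height - 1) - 1
--     trajs = []
--     for x, y, dx, dy in blizzards:
--         cx, cy = x, y
--         traj = []
--         for _ in range(T - 1):
--             ny = cy + dy
--             cy = 1 if ny >= height else height - 1 if ny < 1 else ny
--             nx = cx + dx
--             cx = 1 if nx >= width else width - 1 if nx < 1 else nx
--             traj.append((cx, cy))
--         trajs.append(traj)
--     result = {0: set((x, y) for x, y, _, _ in blizzards)}
--     for t in range(1, T):
--         result[t] = set(traj[t - 1] for traj in trajs)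
--     return result
-- ===== Notes on version B (the rewrite author's own statement) =====
-- stated objective: alternative
-- what changed: B precomputes each blizzard's whole trajectory once (loop interchange: per-blizzard inner time loop) and then builds each time step's set by indexing the trajectories, replacing A's per-step queue simulation that pops from the front of the shared list; B also avoids A's in-place mutation of the blizzards argument.
import Mathlib
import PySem

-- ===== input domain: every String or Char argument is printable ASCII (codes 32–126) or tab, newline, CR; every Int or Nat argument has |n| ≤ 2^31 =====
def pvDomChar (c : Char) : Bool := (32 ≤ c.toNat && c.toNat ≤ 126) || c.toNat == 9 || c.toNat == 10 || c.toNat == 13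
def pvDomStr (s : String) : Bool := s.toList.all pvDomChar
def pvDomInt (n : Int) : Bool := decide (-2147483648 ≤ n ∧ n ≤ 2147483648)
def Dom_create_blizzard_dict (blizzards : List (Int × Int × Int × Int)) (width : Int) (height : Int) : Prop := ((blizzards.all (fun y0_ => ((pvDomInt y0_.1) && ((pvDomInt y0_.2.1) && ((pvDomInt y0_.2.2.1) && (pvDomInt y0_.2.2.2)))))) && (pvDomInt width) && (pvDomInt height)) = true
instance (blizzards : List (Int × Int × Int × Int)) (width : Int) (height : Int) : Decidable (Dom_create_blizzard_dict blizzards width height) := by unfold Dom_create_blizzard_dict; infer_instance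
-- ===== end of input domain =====

-- B replaces A's per-step pop(0)/append queue simulation by one precomputed trajectory per
-- blizzard (loop interchange), then builds each step's set by indexing the trajectories.
-- A mutates its `blizzards` argument in place (B does not); the equivalence proved here is
-- about the RETURN value only.

-- ===== PORT A =====
-- the inner 'for _ in range(len(blizzards)): pop(0) … append(moved)' loop, fuel = len(blizzards)
def pvAloop (width height : Int) : Nat → List (Int × Int × Int × Int) → List (Int × Int × Int × Int)
  | 0, bs => bs
  | n + 1, bs =>
    match bs with
    | [] => []  -- blizzards.pop(0) would raise here; unreachable: the loop runs exactly len(blizzards) times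
    | (x, y, dx, dy) :: rest =>
      let nx := x + dx
      let ny := y + dy
      let ny := if ny ≥ height then 1 else if ny < 1 then height - 1 else ny
      let nx := if nx ≥ width then 1 else if nx < 1 then width - 1 else nx
      pvAloop width height n (rest ++ [(nx, ny, dx, dy)])

def create_blizzard_dict (blizzards : List (Int × Int × Int × Int)) (width : Int) (height : Int) : List (Int × List (Int × Int)) :=
  let d0 : PySem.Dict Int (List (Int × Int)) :=
    PySem.Dict.insert PySem.Dict.empty 0 (PySem.Set.ofList (blizzards.map (fun b => (b.1, b.2.1))))
  let st := (PySem.List.pyRange 1 ((width - 1) * (height - 1) - 1) 1).foldl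
    (fun (st : List (Int × Int × Int × Int) × PySem.Dict Int (List (Int × Int))) t =>
      let bs := pvAloop width height st.1.length st.1
      (bs, st.2.insert t (PySem.Set.ofList (bs.map (fun b => (b.1, b.2.1))))))
    (blizzards, d0)
  st.2.items

-- ===== PORT B =====
-- one blizzard's trajectory: positions after step 1, 2, …, n (Source B's inner 'for _ in range(T-1)')
def pvTraj (width height dx dy : Int) : Nat → Int → Int → List (Int × Int)
  | 0, _, _ => []
  | n + 1, cx, cy =>
    let ny := cy + dy
    let cy' := if ny ≥ height then 1 else if ny < 1 then height - 1 else ny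
    let nx := cx + dx
    let cx' := if nx ≥ width then 1 else if nx < 1 then width - 1 else nx
    (cx', cy') :: pvTraj width height dx dy n cx' cy'

def create_blizzard_dict_alt (blizzards : List (Int × Int × Int × Int)) (width : Int) (height : Int) : List (Int × List (Int × Int)) :=
  let T := (width - 1) * (height - 1) - 1
  let trajs := blizzards.map (fun b => pvTraj width height b.2.2.1 b.2.2.2 (T - 1).toNat b.1 b.2.1)
  let d0 : PySem.Dict Int (List (Int × Int)) :=
    PySem.Dict.insert PySem.Dict.empty 0 (PySem.Set.ofList (blizzards.map (fun b => (b.1, b.2.1))))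
  let d := (PySem.List.pyRange 1 T 1).foldl
    (fun d t =>
      -- traj[t - 1]: the index is always in range (proved below), so the default is never used
      d.insert t (PySem.Set.ofList (trajs.map (fun tr => (PySem.List.pyGet? tr (t - 1)).getD (0, 0)))))
    d0
  d.items

-- ===== PRECONDITION & SPEC =====
def Spec_create_blizzard_dict (blizzards : List (Int × Int × Int × Int)) (width : Int) (height : Int) (out : List (Int × List (Int × Int))) : Prop := out = create_blizzard_dict_alt blizzards width height
instance (blizzards : List (Int × Int × Int × Int)) (width : Int) (height : Int) (out : List (Int × List (Int × Int))) : Decidable (Spec_create_blizzard_dict blizzards width height out) := by unfold Spec_create_blizzard_dict; infer_instance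

-- ===== CLAIM (what is proved, stated in full; the proofs are below) =====
def Claim_equal_create_blizzard_dict : Prop := ∀ (blizzards : List (Int × Int × Int × Int)) (width : Int) (height : Int), Dom_create_blizzard_dict blizzards width height → Spec_create_blizzard_dict blizzards width height (create_blizzard_dict blizzards width height)

-- ===== LEMMAS AND PROOFS =====

-- one pop(0)/append move of a single blizzard (what A's loop body does to the element it pops)
def pvStep (width height : Int) (b : Int × Int × Int × Int) : Int × Int × Int × Int :=
  let nx := b.1 + b.2.2.1
  let ny := b.2.1 + b.2.2.2
  let ny := if ny ≥ height then 1 else if ny < 1 then height - 1 else ny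
  let nx := if nx ≥ width then 1 else if nx < 1 then width - 1 else nx
  (nx, ny, b.2.2.1, b.2.2.2)

-- k-fold iteration of pvStep
def pvIter (width height : Int) : Nat → (Int × Int × Int × Int) → Int × Int × Int × Int
  | 0, b => b
  | k + 1, b => pvIter width height k (pvStep width height b)

theorem pvIter_succ' (width height : Int) (k : Nat) (b : Int × Int × Int × Int) :
    pvIter width height (k + 1) b = pvStep width height (pvIter width height k b) := by
  induction k generalizing b with
  | zero => rfl
  | succ k ih => exact ih (pvStep width height b)

theorem pvAloop_eq (width height : Int) :
    ∀ (n : Nat) (bs : List (Int × Int × Int × Int)), n ≤ bs.length →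
      pvAloop width height n bs = bs.drop n ++ (bs.take n).map (pvStep width height) := by
  intro n
  induction n with
  | zero => intro bs _; simp [pvAloop]
  | succ n ih =>
    intro bs hlen
    match bs with
    | [] => simp at hlen
    | (x, y, dx, dy) :: rest =>
      have hn : n ≤ rest.length := by simpa using hlen
      have hn' : n ≤ (rest ++ [pvStep width height (x, y, dx, dy)]).length := by
        simp; omega
      have := ih _ hn'
      rw [show pvAloop width height (n + 1) ((x, y, dx, dy) :: rest)
            = pvAloop width height n (rest ++ [pvStep width height (x, y, dx, dy)]) from rfl]
      rw [this]
      rw [List.drop_append_of_le_length (by omega), List.take_append_of_le_length (by omega)]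
      simp [List.append_assoc]

theorem pvAloop_len (width height : Int) (bs : List (Int × Int × Int × Int)) :
    pvAloop width height bs.length bs = bs.map (pvStep width height) := by
  simpa using pvAloop_eq width height bs.length bs le_rfl

theorem pvTraj_get (width height : Int) :
    ∀ (n k : Nat), k < n → ∀ (b : Int × Int × Int × Int),
      (pvTraj width height b.2.2.1 b.2.2.2 n b.1 b.2.1)[k]? =
        some ((pvIter width height (k + 1) b).1, (pvIter width height (k + 1) b).2.1) := by
  intro n
  induction n with
  | zero => intro k hk; omega
  | succ n ih =>
    intro k hk b
    match k with
    | 0 => rfl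
    | k + 1 =>
      have hk' : k < n := by omega
      have := ih k hk' (pvStep width height b)
      simpa [pvTraj, pvIter] using this

-- the two outer folds agree, given the A-side list is the k-fold iterate of the input
theorem pv_fold_eq (blizzards : List (Int × Int × Int × Int)) (width height : Int) :
    ∀ (m : Nat) (s : Int) (d : PySem.Dict Int (List (Int × Int))), 1 ≤ s →
      ((width - 1) * (height - 1) - 1 - s).toNat = m →
      ((PySem.List.pyRange s ((width - 1) * (height - 1) - 1) 1).foldl
        (fun (st : List (Int × Int × Int × Int) × PySem.Dict Int (List (Int × Int))) t =>
          let bs := pvAloop width height st.1.length st.1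
          (bs, st.2.insert t (PySem.Set.ofList (bs.map (fun b => (b.1, b.2.1))))))
        (blizzards.map (pvIter width height (s - 1).toNat), d)).2
      = (PySem.List.pyRange s ((width - 1) * (height - 1) - 1) 1).foldl
          (fun d t =>
            d.insert t (PySem.Set.ofList
              ((blizzards.map (fun b => pvTraj width height b.2.2.1 b.2.2.2
                  ((width - 1) * (height - 1) - 1 - 1).toNat b.1 b.2.1)).map
                (fun tr => (PySem.List.pyGet? tr (t - 1)).getD (0, 0)))))
          d := by
  intro m
  set T := (width - 1) * (height - 1) - 1 with hT
  induction m with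
  | zero =>
    intro s d hs hm
    have : T ≤ s := by omega
    rw [PySem.List.pyRange_one_eq_nil this]
    rfl
  | succ m ih =>
    intro s d hs hm
    have hsT : s < T := by omega
    rw [PySem.List.pyRange_one_cons hsT]
    simp only [List.foldl_cons]
    -- the A-side new list is the next iterate
    have hbs : pvAloop width height (blizzards.map (pvIter width height (s - 1).toNat)).length
        (blizzards.map (pvIter width height (s - 1).toNat))
        = blizzards.map (pvIter width height s.toNat) := by
      rw [pvAloop_len, List.map_map]
      apply List.map_congr_left
      intro b _
      have hsucc : (s - 1).toNat + 1 = s.toNat := by omega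
      show pvStep width height (pvIter width height (s - 1).toNat b)
          = pvIter width height s.toNat b
      rw [← hsucc, pvIter_succ']
    -- the two inserted set values coincide
    have hval : (blizzards.map (pvIter width height s.toNat)).map (fun b => (b.1, b.2.1))
        = (blizzards.map (fun b => pvTraj width height b.2.2.1 b.2.2.2
            (T - 1).toNat b.1 b.2.1)).map (fun tr => (PySem.List.pyGet? tr (s - 1)).getD (0, 0)) := by
      rw [List.map_map, List.map_map]
      apply List.map_congr_left
      intro b _
      have h1 : (0 : Int) ≤ s - 1 := by omega
      have hk : (s - 1).toNat < (T - 1).toNat := by omega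
      show ((pvIter width height s.toNat b).1, (pvIter width height s.toNat b).2.1)
          = (PySem.List.pyGet? (pvTraj width height b.2.2.1 b.2.2.2 (T - 1).toNat b.1 b.2.1) (s - 1)).getD (0, 0)
      rw [PySem.List.pyGet?_of_nonneg _ h1, pvTraj_get width height _ _ hk b]
      have : (s - 1).toNat + 1 = s.toNat := by omega
      rw [this]
      rfl
    have hnext := ih (s + 1) (d.insert s (PySem.Set.ofList
        ((blizzards.map (pvIter width height s.toNat)).map (fun b => (b.1, b.2.1)))))
      (by omega) (by omega)
    have hstoNat : (s + 1 - 1).toNat = s.toNat := by omega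
    rw [hstoNat] at hnext
    simp only [hbs]
    rw [hnext, hval]

theorem create_blizzard_dict_eq (blizzards : List (Int × Int × Int × Int)) (width height : Int) :
    create_blizzard_dict blizzards width height = create_blizzard_dict_alt blizzards width height := by
  unfold create_blizzard_dict create_blizzard_dict_alt
  simp only []
  congr 1
  have h0 : blizzards.map (pvIter width height ((1 : Int) - 1).toNat) = blizzards := by
    simp [pvIter]
  have key := pv_fold_eq blizzards width height
    ((width - 1) * (height - 1) - 1 - 1).toNat 1
    (PySem.Dict.insert PySem.Dict.empty 0
      (PySem.Set.ofList (blizzards.map (fun b => (b.1, b.2.1))))) le_rfl rfl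
  rw [h0] at key
  exact key

-- ===== VERDICT (by name: the statement is the Claim_ definition above) =====
theorem create_blizzard_dict_spec : Claim_equal_create_blizzard_dict := by
  intro blizzards width height _
  unfold Spec_create_blizzard_dict
  exact create_blizzard_dict_eq blizzards width height
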